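-- pv_equiv track=rewrite | github.com/namburikrishnaganesh/CSA5121-Cryptography | EXP - 14.py | encrypt_otp
-- ===== SOURCE A (Python) =====
-- def char_to_num(c):
--     return ord(c.lower()) - ord('a')
--
-- def num_to_char(n):
--     return chr(ord('a') + n)
--
-- def encrypt_otp(plaintext, key):
--     ciphertext = []
--     key_index = 0   # new pointer for key
--
--     for ch in plaintext:
--         if ch == ' ':
--             ciphertext.append(' ')
--         else:
--             p = char_to_num(ch)
--             c = (p + key[key_index]) % 26
--             ciphertext.append(num_to_char(c))
--             key_index += 1   # move key only when letter used
--     return ''.join(ciphertext)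
-- ===== SOURCE B (Python) =====
-- def char_to_num(c):
--     return ord(c.lower()) - ord('a')
--
-- def num_to_char(n):
--     return chr(ord('a') + n)
--
-- def encrypt_otp(plaintext, key):
--     letters = [ch for ch in plaintext if ch != ' ']
--     encrypted = [num_to_char((char_to_num(ch) + key[i]) % 26)
--                  for i, ch in enumerate(letters)]
--     it = iter(encrypted)
--     return ''.join(' ' if ch == ' ' else next(it) for ch in plaintext)
-- ===== Notes on version B (the rewrite author's own statement) =====
-- stated objective: alternative
-- what changed: Single stateful loop with a running key pointer replaced by a two-pass extract/reinsert: encrypt the non-space characters in one enumerate-indexed comprehension, then reinsert spaces by a second pass consuming an iterator over the encrypted letters.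
import Mathlib
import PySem

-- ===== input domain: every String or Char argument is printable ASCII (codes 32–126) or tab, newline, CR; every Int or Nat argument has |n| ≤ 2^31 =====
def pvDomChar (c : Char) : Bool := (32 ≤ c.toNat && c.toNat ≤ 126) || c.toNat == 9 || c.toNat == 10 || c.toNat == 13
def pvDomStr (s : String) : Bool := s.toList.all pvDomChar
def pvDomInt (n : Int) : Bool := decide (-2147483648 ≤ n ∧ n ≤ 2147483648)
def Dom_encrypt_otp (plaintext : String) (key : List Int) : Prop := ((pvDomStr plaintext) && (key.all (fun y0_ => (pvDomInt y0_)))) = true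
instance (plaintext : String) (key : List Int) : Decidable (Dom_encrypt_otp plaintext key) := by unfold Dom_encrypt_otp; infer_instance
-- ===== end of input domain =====

-- B replaces A's single stateful loop (running key pointer) by a two-pass extract/reinsert
-- decomposition; same cost, alternative structure. Equivalence is about the return value.

-- ===== PORT A =====
-- char_to_num(c) = ord(c.lower()) - ord('a')
def charToNum (c : Char) : Int := (Int.ofNat (PySem.Chars.lowerChar c).toNat) - 97
-- num_to_char(n) = chr(ord('a') + n)
def numToChar (n : Int) : Char := Char.ofNat (97 + n).toNat

-- the for-loop of A: builds ciphertext, threading key_index; key[key_index] is pyGet?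
-- (none = IndexError, excluded by Pre_; .getD 0 only fills the excluded case)
def encOtpLoopA : List Char → List Int → Int → List Char
  | [], _, _ => []
  | ch :: rest, key, keyIndex =>
    if ch = ' ' then ' ' :: encOtpLoopA rest key keyIndex
    else
      numToChar (PySem.Int.mod (charToNum ch + ((PySem.List.pyGet? key keyIndex).getD 0)) 26)
        :: encOtpLoopA rest key (keyIndex + 1)

def encrypt_otp (plaintext : String) (key : List Int) : String :=
  String.ofList (encOtpLoopA plaintext.toList key 0)

-- ===== PORT B =====
-- one encrypted letter from an (index, letter) pair of enumerate(letters)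
def encPair (key : List Int) (p : Int × Char) : Char :=
  numToChar (PySem.Int.mod (charToNum p.2 + ((PySem.List.pyGet? key p.1).getD 0)) 26)

-- second pass: walk the original text, emit ' ' for spaces, otherwise next(it)
-- ([] branch of es = iterator exhausted: unreachable, enc has one letter per non-space)
def reinsert : List Char → List Char → List Char
  | [], _ => []
  | ch :: rest, es =>
    if ch = ' ' then ' ' :: reinsert rest es
    else match es with
      | e :: es' => e :: reinsert rest es'
      | [] => []

def encrypt_otp_alt (plaintext : String) (key : List Int) : String :=
  let letters := plaintext.toList.filter (fun ch => ch ≠ ' ')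
  let encrypted := (PySem.List.enumerate letters 0).map (encPair key)
  String.ofList (reinsert plaintext.toList encrypted)

-- ===== PRECONDITION & SPEC =====
-- Pre_ excludes exactly the inputs where A raises IndexError: fewer key entries than non-space characters.
def Pre_encrypt_otp (plaintext : String) (key : List Int) : Prop :=
  plaintext.toList.countP (fun ch => ch ≠ ' ') ≤ key.length
instance (plaintext : String) (key : List Int) : Decidable (Pre_encrypt_otp plaintext key) := by
  unfold Pre_encrypt_otp; infer_instance

def pvWitness_encrypt_otp : String × List Int := ("hi th7re", [3, 1, 4, 1, 5, 9, 2])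

def Spec_encrypt_otp (plaintext : String) (key : List Int) (out : String) : Prop := out = encrypt_otp_alt plaintext key
instance (plaintext : String) (key : List Int) (out : String) : Decidable (Spec_encrypt_otp plaintext key out) := by unfold Spec_encrypt_otp; infer_instance

-- ===== CLAIM (what is proved, stated in full; the proofs are below) =====
def Claim_equal_encrypt_otp : Prop := ∀ (plaintext : String) (key : List Int), Dom_encrypt_otp plaintext key → Pre_encrypt_otp plaintext key → Spec_encrypt_otp plaintext key (encrypt_otp plaintext key)

-- ===== LEMMAS AND PROOFS =====

-- core invariant: reinserting the enumerate-mapped encryption of the remaining letters,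
-- starting the enumeration at A's current key index, reproduces A's loop.
lemma reinsert_eq_loop (key : List Int) :
    ∀ (cs : List Char) (i : Int),
      reinsert cs ((PySem.List.enumerate (cs.filter (fun ch => ch ≠ ' ')) i).map (encPair key))
        = encOtpLoopA cs key i := by
  intro cs
  induction cs with
  | nil => intro i; simp [reinsert, encOtpLoopA]
  | cons ch rest ih =>
    intro i
    by_cases h : ch = ' '
    · subst h
      simpa [List.filter_cons, reinsert, encOtpLoopA] using ih i
    · simpa [List.filter_cons, h, PySem.List.enumerate_cons, reinsert, encOtpLoopA, encPair]
        using ih (i + 1)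

-- ===== VERDICT (by name: the statement is the Claim_ definition above) =====
theorem encrypt_otp_spec : Claim_equal_encrypt_otp := by
  intro plaintext key _ _
  unfold Spec_encrypt_otp encrypt_otp encrypt_otp_alt
  exact congrArg String.ofList (reinsert_eq_loop key plaintext.toList 0).symm
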